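-- pv_equiv track=rewrite | github.com/mouradap/bioFellow | functions.py | mRNAtoDNA
-- ===== SOURCE A (Python) =====
-- def mRNAtoDNA(mRNA):
--
-- 	DNA = ""
-- 	validChars = ['A', 'U', 'C', 'G']
-- 	for char in mRNA.strip().upper():
--
-- 		if char not in validChars:
-- 			return "Invalid Codon"
-- 		else:
--
-- 			if char == "U":
-- 				char = "T"
-- 			DNA += char
--
-- 	return DNA
-- ===== SOURCE B (Python) =====
-- def mRNAtoDNA(mRNA):
--     s = mRNA.strip().upper()
--     if not set(s) <= {'A', 'U', 'C', 'G'}: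
--         return "Invalid Codon"
--     return s.translate(str.maketrans('U', 'T'))
-- ===== Notes on version B (the rewrite author's own statement) =====
-- stated objective: simpler
-- what changed: Replaces the fused per-character validate-and-append loop (with quadratic string concatenation and early return) by two separate whole-string passes: a set-inclusion validity check, then a single translate of U to T.
import Mathlib
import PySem

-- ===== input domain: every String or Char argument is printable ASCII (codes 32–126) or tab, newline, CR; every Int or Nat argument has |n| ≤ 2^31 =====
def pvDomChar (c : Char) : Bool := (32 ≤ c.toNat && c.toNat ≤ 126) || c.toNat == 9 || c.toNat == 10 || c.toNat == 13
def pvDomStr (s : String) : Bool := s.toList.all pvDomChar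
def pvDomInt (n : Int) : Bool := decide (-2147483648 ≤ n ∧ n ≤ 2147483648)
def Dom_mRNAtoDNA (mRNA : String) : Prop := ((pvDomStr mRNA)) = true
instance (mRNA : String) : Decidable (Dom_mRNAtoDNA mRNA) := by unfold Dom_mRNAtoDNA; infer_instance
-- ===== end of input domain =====

-- B replaces A's fused validate-and-append loop by two whole-string passes (set-inclusion check, then translate U→T); objective: simpler.

-- ===== PORT A =====
-- A's loop: early return "Invalid Codon" on a bad char, else append (U rewritten to T).
-- The string accumulator DNA is carried as a List Char and materialised at the end
-- (exact: Lean's String.append is opaque to the kernel).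
def pvGoA : List Char → List Char → String
  | [], acc => String.mk acc
  | c :: cs, acc =>
      if ¬ (c ∈ (['A', 'U', 'C', 'G'] : List Char)) then "Invalid Codon"
      else pvGoA cs (acc ++ [if c = 'U' then 'T' else c])

def mRNAtoDNA (mRNA : String) : String :=
  pvGoA (PySem.Str.upper (PySem.Str.strip mRNA)).toList []

-- ===== PORT B =====
-- str.translate with the single-entry table {'U':'T'} is the per-character map c ↦ (if c = 'U' then 'T' else c); exact on all code points.
def mRNAtoDNA_alt (mRNA : String) : String :=
  let s := PySem.Str.upper (PySem.Str.strip mRNA)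
  if ¬ (PySem.Set.issubset (PySem.Set.ofList s.toList) (['A', 'U', 'C', 'G'] : List Char) = true)
  then "Invalid Codon"
  else String.mk (s.toList.map (fun c => if c = 'U' then 'T' else c))

-- ===== PRECONDITION & SPEC =====
def Spec_mRNAtoDNA (mRNA : String) (out : String) : Prop := out = mRNAtoDNA_alt mRNA
instance (mRNA : String) (out : String) : Decidable (Spec_mRNAtoDNA mRNA out) := by unfold Spec_mRNAtoDNA; infer_instance

-- ===== CLAIM (what is proved, stated in full; the proofs are below) =====
def Claim_equal_mRNAtoDNA : Prop := ∀ (mRNA : String), Dom_mRNAtoDNA mRNA → Spec_mRNAtoDNA mRNA (mRNAtoDNA mRNA)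

-- ===== LEMMAS AND PROOFS =====
lemma pvGoA_eq (cs : List Char) : ∀ acc : List Char,
    pvGoA cs acc =
      if cs.all (fun c => decide (c ∈ (['A', 'U', 'C', 'G'] : List Char)))
      then String.mk (acc ++ cs.map (fun c => if c = 'U' then 'T' else c))
      else "Invalid Codon" := by
  induction cs with
  | nil => intro acc; simp [pvGoA]
  | cons c cs ih =>
      intro acc
      by_cases h : c ∈ (['A', 'U', 'C', 'G'] : List Char)
      · rw [show pvGoA (c :: cs) acc
              = pvGoA cs (acc ++ [if c = 'U' then 'T' else c]) from by
            simp [pvGoA, h]]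
        rw [ih]
        have hb : decide (c ∈ (['A', 'U', 'C', 'G'] : List Char)) = true := by simp [h]
        rw [List.all_cons, hb, Bool.true_and]
        by_cases hr : (cs.all fun x => decide (x ∈ (['A', 'U', 'C', 'G'] : List Char))) = true
        · rw [if_pos hr, if_pos hr, List.map_cons]
          simp
        · rw [if_neg hr, if_neg hr]
      · rw [show pvGoA (c :: cs) acc = "Invalid Codon" from by simp [pvGoA, h]]
        rw [List.all_cons, if_neg]
        simp [h]

-- ===== VERDICT (by name: the statement is the Claim_ definition above) =====
theorem mRNAtoDNA_spec : Claim_equal_mRNAtoDNA := by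
  intro mRNA _
  unfold Spec_mRNAtoDNA mRNAtoDNA mRNAtoDNA_alt
  set s := PySem.Str.upper (PySem.Str.strip mRNA) with hs
  rw [pvGoA_eq]
  have hiff :
      (s.toList.all (fun c => decide (c ∈ (['A', 'U', 'C', 'G'] : List Char))) = true)
        ↔ (PySem.Set.issubset (PySem.Set.ofList s.toList) (['A', 'U', 'C', 'G'] : List Char) = true) := by
    rw [PySem.Set.issubset_iff, List.all_eq_true]
    constructor
    · intro h x hx
      have := h x ((PySem.Set.mem_ofList _ _).1 hx)
      simpa using this
    · intro h x hx
      simpa using h x ((PySem.Set.mem_ofList _ _).2 hx)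
  by_cases hv : s.toList.all (fun c => decide (c ∈ (['A', 'U', 'C', 'G'] : List Char))) = true
  · rw [if_pos hv, if_neg (by simp [hiff.1 hv])]
    simp
  · rw [if_neg hv, if_pos]
    intro hc
    exact absurd (hiff.2 hc) hv
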